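-- pv_equiv track=rewrite | github.com/EDBERTTTTpeaceee/DaTaskScheduler | src/provenance.py | simple_phonetic
-- ===== SOURCE A (Python) =====
-- import unicodedata
--
-- def normalize_text(s: str) -> str:
--     if s is None:
--         return ""
--     ns = unicodedata.normalize("NFC", s).strip()
--     ns = " ".join(ns.split())
--     return ns
--
-- def simple_phonetic(s: str) -> str:
--     s = s.lower()
--     s = normalize_text(s)
--     out = []
--     for ch in s:
--         if 'a' <= ch <= 'z' or '0' <= ch <= '9':
--             out.append(ch)
--         else:
--             out.append('-')
--
--     res = []
--     prev = None
--     for c in out: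
--         if c == '-' and prev == '-':
--             continue
--         res.append(c)
--         prev = c
--
--     return "".join(res)[:12]
-- ===== SOURCE B (Python) =====
-- import re
-- import unicodedata
--
-- def normalize_text(s: str) -> str:
--     if s is None:
--         return ""
--     ns = unicodedata.normalize("NFC", s).strip()
--     ns = " ".join(ns.split())
--     return ns
--
-- def simple_phonetic(s: str) -> str:
--     s = normalize_text(s.lower())
--     return re.sub(r'[^a-z0-9]+', '-', s)[:12]
-- ===== Notes on version B (the rewrite author's own statement) =====
-- stated objective: faster
-- what changed: Replaced A's two Python-level passes (char-by-char mapping loop plus a prev-tracking collapse loop) with a single regex substitution that turns each maximal run of non-alphanumerics into one dash, so both passes run fused inside the C regex engine.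
import Mathlib
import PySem

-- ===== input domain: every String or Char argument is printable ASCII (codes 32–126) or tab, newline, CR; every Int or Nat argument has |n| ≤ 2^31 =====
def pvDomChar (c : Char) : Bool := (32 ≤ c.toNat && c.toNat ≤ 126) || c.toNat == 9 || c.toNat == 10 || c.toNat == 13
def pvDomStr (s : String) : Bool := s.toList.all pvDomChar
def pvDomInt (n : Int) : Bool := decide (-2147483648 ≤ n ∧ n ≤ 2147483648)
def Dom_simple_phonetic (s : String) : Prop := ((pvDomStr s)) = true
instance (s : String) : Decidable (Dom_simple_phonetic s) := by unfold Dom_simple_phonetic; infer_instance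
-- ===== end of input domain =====

-- B fuses A's two passes (alnum-map loop + dash-collapse loop) into one regex-style scan; same result, stated for printable-ASCII input (where NFC normalization is the identity).

-- ===== PORT A =====
-- shared helper: normalize_text (identical in Source A and Source B).
-- unicodedata.normalize("NFC", s) is the identity on the ASCII domain, so it is ported as such (exact on Dom).
def pyNormalizeText (cs : List Char) : List Char :=
  let ns := PySem.Chars.strip cs
  PySem.Chars.join [' '] (PySem.Chars.split₀ ns)

-- first loop of A: map each char to itself (alnum) or '-'
def pvAMap : List Char → List Char
  | [] => []
  | ch :: rest =>
      (if ('a' ≤ ch ∧ ch ≤ 'z') ∨ ('0' ≤ ch ∧ ch ≤ '9') then ch else '-') :: pvAMap rest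

-- second loop of A: skip a '-' whose previous appended char was '-'
def pvACollapse : Option Char → List Char → List Char
  | _, [] => []
  | prev, c :: rest =>
      if c = '-' ∧ prev = some '-' then pvACollapse prev rest
      else c :: pvACollapse (some c) rest

def simple_phonetic (s : String) : String :=
  let s1 := PySem.Chars.lower s.toList
  let s2 := pyNormalizeText s1
  -- "".join(res)[:12]
  String.ofList (PySem.List.slice (pvACollapse none (pvAMap s2)) none (some 12))

-- ===== PORT B =====
def pvNonAlnum (c : Char) : Bool :=
  !((decide ('a' ≤ c) && decide (c ≤ 'z')) || (decide ('0' ≤ c) && decide (c ≤ '9')))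

-- re.sub(r'[^a-z0-9]+', '-', ·): each maximal run of non-alnum chars becomes one '-'
def pvReSub : List Char → List Char
  | [] => []
  | c :: rest =>
      if pvNonAlnum c then '-' :: pvReSub (rest.dropWhile pvNonAlnum)
      else c :: pvReSub rest
  termination_by l => l.length
  decreasing_by
    · simpa using Nat.lt_succ_of_le (List.length_dropWhile_le pvNonAlnum rest)
    · simp

def simple_phonetic_alt (s : String) : String :=
  let t := pyNormalizeText (PySem.Chars.lower s.toList)
  String.ofList (PySem.List.slice (pvReSub t) none (some 12))

-- ===== PRECONDITION & SPEC =====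
def Spec_simple_phonetic (s : String) (out : String) : Prop := out = simple_phonetic_alt s
instance (s : String) (out : String) : Decidable (Spec_simple_phonetic s out) := by unfold Spec_simple_phonetic; infer_instance

-- ===== CLAIM (what is proved, stated in full; the proofs are below) =====
def Claim_equal_simple_phonetic : Prop := ∀ (s : String), Dom_simple_phonetic s → Spec_simple_phonetic s (simple_phonetic s)

-- ===== LEMMAS AND PROOFS =====

lemma pvNonAlnum_iff (c : Char) :
    pvNonAlnum c = false ↔ ('a' ≤ c ∧ c ≤ 'z') ∨ ('0' ≤ c ∧ c ≤ '9') := by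
  simp only [pvNonAlnum, Bool.not_eq_false', Bool.or_eq_true, Bool.and_eq_true,
    decide_eq_true_eq]

lemma pvAlnum_ne_dash (c : Char) (h : ('a' ≤ c ∧ c ≤ 'z') ∨ ('0' ≤ c ∧ c ≤ '9')) : c ≠ '-' := by
  rintro rfl
  revert h; decide

-- the fused-scan invariant: A's collapse of A's map equals B's single scan,
-- both when the last emitted char was not '-' (part 1) and when it was (part 2)
lemma pvCollapseMap_eq (l : List Char) :
    (∀ prev : Option Char, prev ≠ some '-' → pvACollapse prev (pvAMap l) = pvReSub l) ∧
    pvACollapse (some '-') (pvAMap l) = pvReSub (l.dropWhile pvNonAlnum) := by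
  induction l with
  | nil => simp [pvAMap, pvACollapse, pvReSub]
  | cons c rest ih =>
      by_cases h : ('a' ≤ c ∧ c ≤ 'z') ∨ ('0' ≤ c ∧ c ≤ '9')
      · have hna : pvNonAlnum c = false := (pvNonAlnum_iff c).mpr h
        have hne := pvAlnum_ne_dash c h
        constructor
        · intro prev _
          simp [pvAMap, pvACollapse, pvReSub, h, hna, hne, ih.1 (some c) (by simp [hne])]
        · simp [pvAMap, pvACollapse, pvReSub, h, hna, hne,
            ih.1 (some c) (by simp [hne])]
      · have hna : pvNonAlnum c = true := by
          cases hh : pvNonAlnum c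
          · exact absurd ((pvNonAlnum_iff c).mp hh) h
          · rfl
        constructor
        · intro prev hprev
          simp [pvAMap, pvACollapse, pvReSub, h, hna, hprev, ih.2]
        · simp [pvAMap, pvACollapse, h, hna, ih.2]

-- ===== VERDICT (by name: the statement is the Claim_ definition above) =====
theorem simple_phonetic_spec : Claim_equal_simple_phonetic := by
  intro s _
  unfold Spec_simple_phonetic simple_phonetic simple_phonetic_alt
  have := (pvCollapseMap_eq (pyNormalizeText (PySem.Chars.lower s.toList))).1 none (by simp)
  simp only [this]
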